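-- pv_equiv track=rewrite | github.com/TristenHarr/StartingOut | ChessGame/ChessGame.py | mouseon
-- ===== SOURCE A (Python) =====
-- def mouseon(position):
--     callitx = None
--     callity = None
--     my_ranges = [range(100, 150), range(150, 200),
--                  range(200, 250), range(250, 300),
--                  range(300, 350), range(350, 400),
--                  range(400, 450), range(450, 500),
--                  range(500, 550), range(550, 600)]
--     for i in range(8):
--         if position[0] in my_ranges[i]:
--             callitx = i
--         if position[1] in my_ranges[i]:
--             callity = i
--     return callitx, callity
-- ===== SOURCE B (Python) =====
-- def mouseon(position):
--     def idx(v):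
--         return (v - 100) // 50 if 100 <= v < 500 else None
--     return idx(position[0]), idx(position[1])
-- ===== Notes on version B (the rewrite author's own statement) =====
-- stated objective: simpler
-- what changed: Replaced the loop over eight range objects with a direct arithmetic bucket formula (v-100)//50 guarded by a single bounds check per coordinate.
import Mathlib
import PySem

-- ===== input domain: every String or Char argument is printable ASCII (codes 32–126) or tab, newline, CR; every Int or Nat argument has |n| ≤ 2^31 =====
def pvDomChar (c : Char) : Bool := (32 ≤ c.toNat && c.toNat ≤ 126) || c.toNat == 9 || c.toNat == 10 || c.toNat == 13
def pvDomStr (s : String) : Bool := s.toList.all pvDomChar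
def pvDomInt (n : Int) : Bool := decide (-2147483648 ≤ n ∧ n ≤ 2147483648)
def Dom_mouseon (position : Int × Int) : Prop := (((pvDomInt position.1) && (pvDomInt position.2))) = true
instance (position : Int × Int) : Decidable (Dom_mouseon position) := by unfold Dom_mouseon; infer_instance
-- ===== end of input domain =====

-- B replaces A's loop over eight range objects with a direct arithmetic bucket formula (simpler).

-- ===== PORT A =====
-- A: loop i = 0..7 over a list of half-open ranges, recording the last match per coordinate.
def mouseonRanges : List (Int × Int) :=
  [(100, 150), (150, 200), (200, 250), (250, 300),
   (300, 350), (350, 400), (400, 450), (450, 500),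
   (500, 550), (550, 600)]

def mouseon (position : Int × Int) : Option Int × Option Int :=
  (PySem.List.pyRange 0 8 1).foldl
    (fun (st : Option Int × Option Int) (i : Int) =>
      let r := mouseonRanges.getD i.toNat (0, 0)
      ( if r.1 ≤ position.1 ∧ position.1 < r.2 then some i else st.1,
        if r.1 ≤ position.2 ∧ position.2 < r.2 then some i else st.2 ))
    (none, none)

-- ===== PORT B =====
-- B: direct arithmetic bucket per coordinate.
def mouseonIdx (v : Int) : Option Int :=
  if 100 ≤ v ∧ v < 500 then some (PySem.Int.floordiv (v - 100) 50) else none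

def mouseon_alt (position : Int × Int) : Option Int × Option Int :=
  (mouseonIdx position.1, mouseonIdx position.2)

-- ===== PRECONDITION & SPEC =====
def Spec_mouseon (position : Int × Int) (out : Option Int × Option Int) : Prop := out = mouseon_alt position
instance (position : Int × Int) (out : Option Int × Option Int) : Decidable (Spec_mouseon position out) := by unfold Spec_mouseon; infer_instance

-- ===== CLAIM (what is proved, stated in full; the proofs are below) =====
def Claim_equal_mouseon : Prop := ∀ (position : Int × Int), Dom_mouseon position → Spec_mouseon position (mouseon position)

-- ===== LEMMAS AND PROOFS =====
lemma mouseon_coord (v : Int) :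
    (([0, 1, 2, 3, 4, 5, 6, 7] : List Int).foldl
      (fun (st : Option Int) (i : Int) =>
        let r := mouseonRanges.getD i.toNat (0, 0)
        if r.1 ≤ v ∧ v < r.2 then some i else st) none) = mouseonIdx v := by
  simp only [List.foldl, mouseonIdx,
    show mouseonRanges.getD (Int.toNat 0) (0, 0) = ((100 : Int), (150 : Int)) from rfl,
    show mouseonRanges.getD (Int.toNat 1) (0, 0) = ((150 : Int), (200 : Int)) from rfl,
    show mouseonRanges.getD (Int.toNat 2) (0, 0) = ((200 : Int), (250 : Int)) from rfl,
    show mouseonRanges.getD (Int.toNat 3) (0, 0) = ((250 : Int), (300 : Int)) from rfl,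
    show mouseonRanges.getD (Int.toNat 4) (0, 0) = ((300 : Int), (350 : Int)) from rfl,
    show mouseonRanges.getD (Int.toNat 5) (0, 0) = ((350 : Int), (400 : Int)) from rfl,
    show mouseonRanges.getD (Int.toNat 6) (0, 0) = ((400 : Int), (450 : Int)) from rfl,
    show mouseonRanges.getD (Int.toNat 7) (0, 0) = ((450 : Int), (500 : Int)) from rfl]
  split_ifs <;>
    first
      | rfl
      | omega
      | (simp only [Option.some.injEq]
         rw [eq_comm, PySem.Int.floordiv_eq_iff_of_pos (by norm_num)]
         omega)

-- ===== VERDICT (by name: the statement is the Claim_ definition above) =====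
theorem mouseon_spec : Claim_equal_mouseon := by
  intro position _
  unfold Spec_mouseon mouseon_alt
  rw [← mouseon_coord position.1, ← mouseon_coord position.2]
  rfl
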